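-- pv_equiv track=rewrite | github.com/wopal-cn/ontology | skills/backup/ai-ref-creator/scripts/bundle_docs.py | split_by_heading_level
-- ===== SOURCE A (Python) =====
-- def split_by_heading_level(content: str, heading_marker: str) -> list[dict]:
--     """Split content by specified heading level"""
--     lines = content.split("\n")
--     sections = []
--     current_section = []
--     current_title = "Introduction"
--
--     for line in lines:
--         if line.startswith(heading_marker + " "):
--             if current_section:
--                 section_content = "\n".join(current_section).strip()
--                 if section_content:
--                     sections.append({"title": current_title, "content": section_content})
--             current_title = line[len(heading_marker)+1:].strip()
--             current_section = [line]
--         else: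
--             current_section.append(line)
--
--     if current_section:
--         section_content = "\n".join(current_section).strip()
--         if section_content:
--             sections.append({"title": current_title, "content": section_content})
--
--     return sections
-- ===== SOURCE B (Python) =====
-- def _split_at_heading(lines, prefix):
--     """Split lines at the first heading line: (before, from-heading-on)."""
--     for i, line in enumerate(lines):
--         if line.startswith(prefix):
--             return lines[:i], lines[i:]
--     return lines, []
--
--
-- def split_by_heading_level(content: str, heading_marker: str) -> list[dict]:
--     """Split content by specified heading level (segment-based decomposition)."""
--     prefix = heading_marker + " "
--     lines = content.split("\n")
--     intro, rest = _split_at_heading(lines, prefix)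
--     segments = [("Introduction", intro)]
--     while rest:
--         head = rest[0]
--         body, rest = _split_at_heading(rest[1:], prefix)
--         segments.append((head[len(prefix):].strip(), [head] + body))
--     result = []
--     for title, seg in segments:
--         text = "\n".join(seg).strip()
--         if text:
--             result.append({"title": title, "content": text})
--     return result
-- ===== Notes on version B (the rewrite author's own statement) =====
-- stated objective: alternative
-- what changed: A keeps a running accumulator with flush-on-heading inside one loop; B first splits the line list into titled segments (intro segment plus one segment per heading, found by scanning for the next heading line) and then emits the non-empty segments in a second pass.
import Mathlib
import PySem

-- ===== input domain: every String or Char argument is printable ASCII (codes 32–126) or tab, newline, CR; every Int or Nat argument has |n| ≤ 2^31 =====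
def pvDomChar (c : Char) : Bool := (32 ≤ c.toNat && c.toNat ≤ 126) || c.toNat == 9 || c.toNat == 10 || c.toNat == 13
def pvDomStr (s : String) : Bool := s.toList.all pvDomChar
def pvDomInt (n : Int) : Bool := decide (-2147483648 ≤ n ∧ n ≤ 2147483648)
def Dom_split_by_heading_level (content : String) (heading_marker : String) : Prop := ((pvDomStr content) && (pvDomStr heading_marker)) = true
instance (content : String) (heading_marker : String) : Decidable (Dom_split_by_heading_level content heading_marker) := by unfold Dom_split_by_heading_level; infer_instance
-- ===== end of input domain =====

-- B replaces A's accumulator-with-flush loop by a segment decomposition: split the lines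
-- into titled segments first, then emit the non-empty ones in a second pass (alternative).

-- ===== PORT A =====
-- A's duplicated flush block ("if current_section: … append"):
def pvFlush (sections : List (List (String × String))) (cur : List String) (title : String) :
    List (List (String × String)) :=
  if cur.isEmpty then sections
  else
    let c := PySem.Str.strip (PySem.Str.join "\n" cur)
    if c = "" then sections else sections ++ [[("title", title), ("content", c)]]

-- one iteration of A's for-loop (state = (sections, current_section, current_title))
def pvStepA (heading_marker : String)
    (st : List (List (String × String)) × List String × String) (line : String) :
    List (List (String × String)) × List String × String :=
  if PySem.Str.startswith line (heading_marker ++ " ") then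
    (pvFlush st.1 st.2.1 st.2.2, [line],
     PySem.Str.strip (PySem.Str.slice line (some (PySem.Str.len heading_marker + 1)) none))
  else
    (st.1, st.2.1 ++ [line], st.2.2)

def split_by_heading_level (content : String) (heading_marker : String) :
    List (List (String × String)) :=
  let lines := (PySem.Str.split? content "\n").getD []
  let st := lines.foldl (pvStepA heading_marker) ([], [], "Introduction")
  pvFlush st.1 st.2.1 st.2.2

-- ===== PORT B =====
-- Source B's _split_at_heading: (lines before the first heading line, lines from it on)
def pvSplitAtHeading (pfx : String) : List String → List String × List String
  | [] => ([], [])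
  | l :: ls =>
    if PySem.Str.startswith l pfx then ([], l :: ls)
    else
      let (a, b) := pvSplitAtHeading pfx ls
      (l :: a, b)

-- termination fact for the while-loop below
theorem pvSplitAtHeading_snd_length_le (pfx : String) (ls : List String) :
    (pvSplitAtHeading pfx ls).2.length ≤ ls.length := by
  induction ls with
  | nil => simp [pvSplitAtHeading]
  | cons l ls ih =>
    simp only [pvSplitAtHeading]
    split
    · simp
    · simpa using Nat.le_succ_of_le ih

-- Source B's while-loop over `rest`, producing the titled heading segments
def pvAltLoop (pfx : String) : List String → List (String × List String)
  | [] => []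
  | h :: t =>
    (PySem.Str.strip (PySem.Str.slice h (some (PySem.Str.len pfx)) none),
      h :: (pvSplitAtHeading pfx t).1) ::
      pvAltLoop pfx (pvSplitAtHeading pfx t).2
termination_by ls => ls.length
decreasing_by
  simp only [List.length_cons]
  exact Nat.lt_succ_of_le (pvSplitAtHeading_snd_length_le _ _)

-- Source B's emission pass over the segments
def pvEmit (result : List (List (String × String))) (ts : String × List String) :
    List (List (String × String)) :=
  let text := PySem.Str.strip (PySem.Str.join "\n" ts.2)
  if text = "" then result else result ++ [[("title", ts.1), ("content", text)]]

def split_by_heading_level_alt (content : String) (heading_marker : String) :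
    List (List (String × String)) :=
  let pfx := heading_marker ++ " "
  let lines := (PySem.Str.split? content "\n").getD []
  let ir := pvSplitAtHeading pfx lines
  let segments := ("Introduction", ir.1) :: pvAltLoop pfx ir.2
  segments.foldl pvEmit []

-- ===== PRECONDITION & SPEC =====
def Spec_split_by_heading_level (content : String) (heading_marker : String) (out : List (List (String × String))) : Prop := out = split_by_heading_level_alt content heading_marker
instance (content : String) (heading_marker : String) (out : List (List (String × String))) : Decidable (Spec_split_by_heading_level content heading_marker out) := by unfold Spec_split_by_heading_level; infer_instance

-- ===== CLAIM (what is proved, stated in full; the proofs are below) =====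
def Claim_equal_split_by_heading_level : Prop := ∀ (content : String) (heading_marker : String), Dom_split_by_heading_level content heading_marker → Spec_split_by_heading_level content heading_marker (split_by_heading_level content heading_marker)

-- ===== LEMMAS AND PROOFS =====

theorem pvSplitAtHeading_eq (pfx : String) (ls : List String) :
    pvSplitAtHeading pfx ls =
      (ls.takeWhile (fun l => !PySem.Str.startswith l pfx),
       ls.dropWhile (fun l => !PySem.Str.startswith l pfx)) := by
  induction ls with
  | nil => simp [pvSplitAtHeading]
  | cons l ls ih =>
    simp only [pvSplitAtHeading, List.takeWhile, List.dropWhile]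
    cases h : PySem.Str.startswith l pfx <;> simp [ih]

theorem pvEmit_append (acc : List (List (String × String))) (ts : String × List String) :
    pvEmit acc ts = acc ++ pvEmit [] ts := by
  simp only [pvEmit]
  split <;> simp

theorem foldl_pvEmit_append (segs : List (String × List String))
    (acc : List (List (String × String))) :
    segs.foldl pvEmit acc = acc ++ segs.foldl pvEmit [] := by
  induction segs generalizing acc with
  | nil => simp
  | cons s segs ih =>
    simp only [List.foldl_cons]
    rw [ih, pvEmit_append, ih (pvEmit [] s), List.append_assoc]

theorem foldl_pvEmit_cons (acc : List (List (String × String))) (s : String × List String)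
    (segs : List (String × List String)) :
    List.foldl pvEmit acc (s :: segs) = acc ++ (pvEmit [] s ++ segs.foldl pvEmit []) := by
  rw [List.foldl_cons, foldl_pvEmit_append segs, pvEmit_append, List.append_assoc]

theorem pvFlush_eq_pvEmit (secs : List (List (String × String))) (cur : List String)
    (title : String) : pvFlush secs cur title = secs ++ pvEmit [] (title, cur) := by
  cases cur with
  | nil =>
    have h : PySem.Str.strip (PySem.Str.join "\n" ([] : List String)) = "" := by decide
    simp [pvFlush, pvEmit, h]
  | cons l ls =>
    simp only [pvFlush, pvEmit, List.isEmpty_cons, Bool.false_eq_true, if_false]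
    by_cases h : PySem.Str.strip (PySem.Str.join "\n" (l :: ls)) = "" <;> simp [h]

theorem pvLenPrefix (m : String) : PySem.Str.len (m ++ " ") = PySem.Str.len m + 1 := by
  simp [PySem.Str.len_eq]

-- main invariant: A's loop from any state equals B's segment emission
theorem pvMain (m : String) (ls : List String) (secs : List (List (String × String)))
    (cur : List String) (title : String) :
    pvFlush (ls.foldl (pvStepA m) (secs, cur, title)).1
        (ls.foldl (pvStepA m) (secs, cur, title)).2.1
        (ls.foldl (pvStepA m) (secs, cur, title)).2.2 =
      secs ++ ((title, cur ++ ls.takeWhile (fun l => !PySem.Str.startswith l (m ++ " "))) ::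
        pvAltLoop (m ++ " ")
          (ls.dropWhile (fun l => !PySem.Str.startswith l (m ++ " ")))).foldl pvEmit [] := by
  induction ls generalizing secs cur title with
  | nil =>
    simp only [List.foldl_nil, List.takeWhile_nil, List.dropWhile_nil, List.append_nil,
      pvAltLoop, foldl_pvEmit_cons]
    rw [pvFlush_eq_pvEmit]
    simp
  | cons l ls ih =>
    rw [List.foldl_cons]
    cases h : PySem.Str.startswith l (m ++ " ") with
    | false =>
      simp only [pvStepA, h, Bool.false_eq_true, if_false]
      rw [ih]
      simp only [List.takeWhile_cons, List.dropWhile_cons, h, Bool.not_false, if_true]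
      simp
    | true =>
      simp only [pvStepA, h, if_true]
      rw [ih]
      simp only [List.takeWhile_cons, List.dropWhile_cons, h, Bool.not_true,
        Bool.false_eq_true, if_false, List.append_nil, pvAltLoop, pvSplitAtHeading_eq,
        pvLenPrefix, foldl_pvEmit_cons, pvFlush_eq_pvEmit, List.singleton_append,
        List.append_assoc, List.nil_append]

-- ===== VERDICT (by name: the statement is the Claim_ definition above) =====
theorem split_by_heading_level_spec : Claim_equal_split_by_heading_level := by
  intro content m _
  unfold Spec_split_by_heading_level split_by_heading_level split_by_heading_level_alt
  simp only []
  rw [pvMain]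
  simp [pvSplitAtHeading_eq]
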